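-- pv_equiv track=rewrite | github.com/wenruo0522/UCB-CS61A | solutions/homework/homework03/hw03.py | collapse
-- ===== SOURCE A (Python) =====
-- def collapse(n):
--     """For non-negative N, the result of removing all digits that are equal
--     to the digit on their right, so that no adjacent digits are the same.
--
--     >>> collapse(1234)
--     1234
--     >>> collapse(12234441)
--     12341
--     >>> collapse(0)
--     0
--     >>> collapse(1120000001333)
--     12013
--     """
--
--     left, last = n // 10, n % 10
--     if left == 0:
--         return last
--     elif left % 10 == last:
--         return collapse(left)
--     else:
--         return collapse(left) * 10 + last
-- ===== SOURCE B (Python) =====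
-- def collapse(n):
--     """For non-negative N, the result of removing all digits that are equal
--     to the digit on their right, so that no adjacent digits are the same."""
--     ds = []  # digits of n, least-significant first
--     while True:
--         ds.append(n % 10)
--         n //= 10
--         if n == 0:
--             break
--     out, prev = 0, None
--     for d in reversed(ds):  # most-significant to least-significant
--         if d != prev:
--             out = out * 10 + d
--         prev = d
--     return out
-- ===== Notes on version B (the rewrite author's own statement) =====
-- stated objective: alternative
-- what changed: Replaces the right-to-left recursive peel that rebuilds the result on the way back up with an explicit two-phase iteration: extract the digit list bottom-up, then one forward pass with an accumulator and a prev-digit register that skips digits equal to their left neighbour.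
import Mathlib
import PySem

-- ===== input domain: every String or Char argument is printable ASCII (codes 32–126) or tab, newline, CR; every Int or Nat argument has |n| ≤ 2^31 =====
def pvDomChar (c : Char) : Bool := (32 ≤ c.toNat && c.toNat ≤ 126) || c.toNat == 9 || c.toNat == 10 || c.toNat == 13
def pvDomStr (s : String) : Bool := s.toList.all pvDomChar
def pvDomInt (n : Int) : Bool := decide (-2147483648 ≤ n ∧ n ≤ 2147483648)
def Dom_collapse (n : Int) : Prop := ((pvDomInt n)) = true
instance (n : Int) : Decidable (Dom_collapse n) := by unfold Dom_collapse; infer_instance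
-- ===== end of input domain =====

-- B replaces A's right-to-left recursion (rebuilding on the way back up) with an explicit
-- digit-list extraction followed by one forward accumulator pass; equal cost, no recursion.
-- Pre_collapse restricts to 0 ≤ n: on negative n the Python A recurses forever (RecursionError).


-- ===== PORT A =====
-- fuel makes the recursion total in Lean; for 0 ≤ n the fuel n.toNat + 1 always suffices
def collapseFuel : Nat → Int → Int
  | 0, _ => 0
  | f + 1, n =>
    let left := PySem.Int.floordiv n 10
    let last := PySem.Int.mod n 10
    if left = 0 then last
    else if PySem.Int.mod left 10 = last then collapseFuel f left
    else collapseFuel f left * 10 + last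

def collapse (n : Int) : Int := collapseFuel (n.toNat + 1) n

-- ===== PORT B =====
-- the while-True digit-extraction loop of Source B (least-significant digit first), fuelled likewise
def pvDigitsFuel : Nat → Int → List Int
  | 0, _ => []
  | f + 1, n =>
    let d := PySem.Int.mod n 10
    let n' := PySem.Int.floordiv n 10
    if n' = 0 then [d] else d :: pvDigitsFuel f n'

-- one step of Source B's for-loop: state = (out, prev)
def pvStep (s : Int × Option Int) (d : Int) : Int × Option Int :=
  (if some d ≠ s.2 then s.1 * 10 + d else s.1, some d)

def collapse_alt (n : Int) : Int :=
  let ds := pvDigitsFuel (n.toNat + 1) n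
  (ds.reverse.foldl pvStep (0, none)).1

-- ===== PRECONDITION & SPEC =====
-- Pre_ excludes exactly the negative inputs, on which A never returns (RecursionError).
def Pre_collapse (n : Int) : Prop := 0 ≤ n
instance (n : Int) : Decidable (Pre_collapse n) := by unfold Pre_collapse; infer_instance
def pvWitness_collapse : Int := (12234441)

def Spec_collapse (n : Int) (out : Int) : Prop := out = collapse_alt n
instance (n : Int) (out : Int) : Decidable (Spec_collapse n out) := by unfold Spec_collapse; infer_instance

-- ===== CLAIM (what is proved, stated in full; the proofs are below) =====
def Claim_equal_collapse : Prop := ∀ (n : Int), Dom_collapse n → Pre_collapse n → Spec_collapse n (collapse n)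

-- ===== LEMMAS AND PROOFS =====

-- key invariant: folding Source B's loop body (right fold over the LSB-first digit list)
-- yields exactly A's recursive value together with the last digit as 'prev'
lemma pv_key : ∀ (f : Nat) (n : Int), 0 ≤ n → n.toNat < f →
    (pvDigitsFuel f n).foldr (fun d s => pvStep s d) (0, (none : Option Int))
      = (collapseFuel f n, some (PySem.Int.mod n 10)) := by
  intro f
  induction f with
  | zero => intro n _ h; omega
  | succ f ih =>
    intro n hn hf
    have hdiv : PySem.Int.floordiv n 10 = n / 10 := by
      simp [PySem.Int.floordiv, Int.fdiv_eq_ediv]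
    have hmodn : PySem.Int.mod n 10 = n % 10 := by
      simp [PySem.Int.mod, Int.fmod_eq_emod]
    have hmodl : PySem.Int.mod (n / 10) 10 = (n / 10) % 10 := by
      simp [PySem.Int.mod, Int.fmod_eq_emod]
    simp only [pvDigitsFuel, collapseFuel, hdiv, hmodn, hmodl]
    by_cases h0 : n / 10 = 0
    · simp [h0, pvStep]
    · have hl : 0 ≤ n / 10 := by omega
      have hlt : (n / 10).toNat < f := by omega
      simp only [if_neg h0, List.foldr_cons]
      rw [ih (n / 10) hl hlt, hmodl]
      simp only [pvStep]
      by_cases he : (n / 10) % 10 = n % 10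
      · simp [he]
      · rw [if_pos (fun h => he (Option.some.inj h).symm), if_neg he]

theorem collapse_spec : Claim_equal_collapse := by
  intro n _ hn
  unfold Spec_collapse collapse collapse_alt
  simp only [List.foldl_reverse, pv_key (n.toNat + 1) n hn (by omega)]
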